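-- pv_equiv track=rewrite | github.com/log-puck/log-puck-blog | scripts/notion_export_to_jekyll_fixed.py | extract_ai_names
-- ===== SOURCE A (Python) =====
-- def split_tags(value: str) -> list[str]:
--     if not value or value.strip() == "":
--         return []
--     # Notion export uses "A, B, C"
--     return [t.strip() for t in value.split(",") if t.strip()]
--
-- def extract_ai_names(value: str) -> list[str]:
--     """
--     Notion relation export looks like:
--     'Claude Sonnet 4.5 (https://... ), ChatGPT (https://...)'
--     We'll extract names before each '(http...)'.
--     """
--     if not value or value.strip() == "":
--         return []
--
--     # Strategy: split by ), then for each part take what's before (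
--     parts = value.split(')')
--     names = []
--
--     for part in parts:
--         part = part.strip()
--         if not part:
--             continue
--
--         # If there's a (, take everything before it
--         if '(' in part:
--             name = part.split('(')[0].strip()
--             # Remove any leading/trailing comma
--             name = name.strip(',').strip()
--             if name:
--                 names.append(name)
--
--     # Fallback: if no matches, try comma split
--     if not names:
--         names = split_tags(value)
--
--     return names
-- ===== SOURCE B (Python) =====
-- def extract_ai_names(value: str) -> list[str]:
--     """Single left-to-right character scan instead of nested split passes."""
--     if not value or value.strip() == "":
--         return []
--
--     names = []
--     buf = []          # chars since the last ')' (or start), up to the first '('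
--     seen_paren = False  # already saw a '(' since the last ')'
--     for ch in value:
--         if ch == ')':
--             buf = []
--             seen_paren = False
--         elif ch == '(':
--             if not seen_paren:
--                 name = ''.join(buf).strip().strip(',').strip()
--                 if name:
--                     names.append(name)
--             seen_paren = True
--         elif not seen_paren:
--             buf.append(ch)
--
--     if not names:
--         names = [t.strip() for t in value.split(',') if t.strip()]
--     return names
-- ===== Notes on version B (the rewrite author's own statement) =====
-- stated objective: alternative
-- what changed: Replaced A's split-on-closing-paren pass with per-part split-on-opening-paren substring work by a single left-to-right character scan that carries a buffer of the characters since the last closing paren and a seen-open-paren flag, emitting a stripped name at each first opening paren.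
import Mathlib
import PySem

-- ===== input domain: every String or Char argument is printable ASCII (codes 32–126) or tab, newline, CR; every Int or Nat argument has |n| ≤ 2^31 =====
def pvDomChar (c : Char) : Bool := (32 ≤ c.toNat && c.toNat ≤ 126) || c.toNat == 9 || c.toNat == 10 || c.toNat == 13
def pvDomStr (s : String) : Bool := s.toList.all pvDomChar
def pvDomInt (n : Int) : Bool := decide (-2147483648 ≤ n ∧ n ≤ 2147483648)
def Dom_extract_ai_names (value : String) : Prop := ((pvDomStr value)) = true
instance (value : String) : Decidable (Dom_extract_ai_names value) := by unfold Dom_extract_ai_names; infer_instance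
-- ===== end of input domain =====

-- B replaces A's split-on-closing-paren / per-part split-on-opening-paren passes with a
-- single left-to-right character scan carrying a buffer and a seen-open-paren flag
-- (objective: alternative, same cost).

-- ===== PORT A =====
def split_tags (value : String) : List String :=
  if value = "" ∨ PySem.Str.strip value = "" then []
  else (((PySem.Str.split? value ",").getD []).filter
          (fun t => PySem.Str.strip t != "")).map PySem.Str.strip

def extract_ai_names (value : String) : List String :=
  if value = "" ∨ PySem.Str.strip value = "" then []
  else
    -- value.split(')') : sep is nonempty, so split? is always `some`
    let parts := (PySem.Str.split? value ")").getD []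
    let names := parts.foldl (fun names part0 =>
      let part := PySem.Str.strip part0
      if part = "" then names
      else if PySem.Str.isIn "(" part then
        -- part.split('(')[0] : the list is nonempty, so [0] is its head
        let name := PySem.Str.strip (((PySem.Str.split? part "(").getD []).headD "")
        let name := PySem.Str.strip (PySem.Str.stripChars name ",")
        if name = "" then names else names ++ [name]
      else names) ([] : List String)
    if names = [] then split_tags value else names

-- ===== PORT B =====
-- the body of Source B's for-loop (one step of the character scan)
def altStep (st : List String × List Char × Bool) (ch : Char) :
    List String × List Char × Bool :=
  let (names, buf, seen) := st
  if ch = ')' then (names, [], false)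
  else if ch = '(' then
    if !seen then
      let name := PySem.Str.strip (PySem.Str.stripChars
        (PySem.Str.strip (String.ofList buf)) ",")
      (if name = "" then names else names ++ [name], buf, true)
    else (names, buf, true)
  else if !seen then (names, buf ++ [ch], seen) else (names, buf, seen)

def extract_ai_names_alt (value : String) : List String :=
  if value = "" ∨ PySem.Str.strip value = "" then []
  else
    let fin := value.toList.foldl altStep ([], [], false)
    let names := fin.1
    if names = [] then
      (((PySem.Str.split? value ",").getD []).filter
        (fun t => PySem.Str.strip t != "")).map PySem.Str.strip
    else names

-- ===== PRECONDITION & SPEC =====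
def Spec_extract_ai_names (value : String) (out : List String) : Prop := out = extract_ai_names_alt value
instance (value : String) (out : List String) : Decidable (Spec_extract_ai_names value out) := by unfold Spec_extract_ai_names; infer_instance

-- ===== CLAIM (what is proved, stated in full; the proofs are below) =====
def Claim_equal_extract_ai_names : Prop := ∀ (value : String), Dom_extract_ai_names value → Spec_extract_ai_names value (extract_ai_names value)

-- ===== LEMMAS AND PROOFS =====

-- ---- chunk decomposition of PySem.Chars.splitOn at a single-character separator ----
def mapHead (f : List Char → List Char) : List (List Char) → List (List Char)
  | [] => []
  | h :: t => f h :: t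

def chunksC (sep : Char) : List Char → List (List Char)
  | [] => [[]]
  | c :: rest => if c = sep then [] :: chunksC sep rest else mapHead (c :: ·) (chunksC sep rest)

lemma chunksC_ne_nil (sep : Char) (l : List Char) : chunksC sep l ≠ [] := by
  induction l with
  | nil => simp [chunksC]
  | cons c rest ih =>
    simp only [chunksC]
    split
    · simp
    · cases h : chunksC sep rest with
      | nil => exact absurd h ih
      | cons a t => simp [mapHead]

lemma chunksC_shape (sep : Char) (l : List Char) :
    ∃ t, chunksC sep l = (l.takeWhile (fun c => c != sep)) :: t := by
  induction l with
  | nil => exact ⟨[], rfl⟩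
  | cons c rest ih =>
    obtain ⟨t, ht⟩ := ih
    by_cases hc : c = sep
    · exact ⟨chunksC sep rest, by simp [chunksC, hc, List.takeWhile]⟩
    · exact ⟨t, by
        have hbc : (c != sep) = true := by simp [hc]
        simp [chunksC, hc, ht, mapHead, List.takeWhile, hbc]⟩

lemma mapHead_nil_append (L : List (List Char)) : mapHead (fun x => [] ++ x) L = L := by
  cases L <;> simp [mapHead]

lemma go_eq (sep : Char) (fuel : Nat) : ∀ (l cur acc : _), l.length < fuel →
    PySem.Chars.splitOn.go [sep] fuel l cur acc
      = acc.reverse ++ mapHead (fun x => cur.reverse ++ x) (chunksC sep l) := by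
  induction fuel with
  | zero => intro l cur acc h; omega
  | succ f ih =>
    intro l cur acc h
    cases l with
    | nil => simp [PySem.Chars.splitOn.go, chunksC, mapHead]
    | cons c rest =>
      rw [PySem.Chars.splitOn.go]
      by_cases hc : c = sep
      · subst hc
        have hpre : List.isPrefixOf [c] (c :: rest) = true := by
          simp [List.isPrefixOf]
        rw [if_pos hpre]
        have h1 : rest.length < f := by simpa using Nat.lt_of_succ_lt_succ h
        rw [ih (List.drop [c].length (c :: rest)) [] (cur.reverse :: acc) (by simpa using h1)]
        cases hch : chunksC c rest with
        | nil => exact absurd hch (chunksC_ne_nil c rest)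
        | cons a t => simp [chunksC, mapHead, hch]
      · have hpre : List.isPrefixOf [sep] (c :: rest) = false := by
          simp [List.isPrefixOf]
          intro hh; exact absurd hh.symm hc
        rw [if_neg (by simp [hpre])]
        have h1 : rest.length < f := by simpa using Nat.lt_of_succ_lt_succ h
        rw [ih rest (c :: cur) acc h1]
        obtain ⟨t, ht⟩ := chunksC_shape sep rest
        simp [chunksC, hc, ht, mapHead]

lemma splitOn_eq_chunksC (sep : Char) (l : List Char) :
    PySem.Chars.splitOn l [sep] = chunksC sep l := by
  unfold PySem.Chars.splitOn
  rw [go_eq sep (l.length + 1) l [] [] (by omega)]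
  have := mapHead_nil_append (chunksC sep l)
  simpa using this

-- ---- Chars-level helpers for both sides' per-chunk name extraction ----
def emitName (buf : List Char) : List String :=
  let name := PySem.Chars.strip (PySem.Chars.stripChars (PySem.Chars.strip buf) [','])
  if name = [] then [] else [String.ofList name]

def delta (ch : List Char) : List String :=
  if '(' ∈ ch then emitName (ch.takeWhile (fun c => c != '(')) else []

-- ---- A-side: the loop body appends a per-part delta ----
def dA (part0 : String) : List String :=
  let part := PySem.Str.strip part0
  if part = "" then []
  else if PySem.Str.isIn "(" part then
    let name := PySem.Str.strip (((PySem.Str.split? part "(").getD []).headD "")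
    let name := PySem.Str.strip (PySem.Str.stripChars name ",")
    if name = "" then [] else [name]
  else []

lemma foldl_dA (l : List String) : ∀ (names : List String),
    l.foldl (fun names part0 =>
      let part := PySem.Str.strip part0
      if part = "" then names
      else if PySem.Str.isIn "(" part then
        let name := PySem.Str.strip (((PySem.Str.split? part "(").getD []).headD "")
        let name := PySem.Str.strip (PySem.Str.stripChars name ",")
        if name = "" then names else names ++ [name]
      else names) names = names ++ l.flatMap dA := by
  induction l with
  | nil => intro names; simp
  | cons p rest ih =>
    intro names
    rw [List.foldl_cons, List.flatMap_cons, ih]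
    show (let part := PySem.Str.strip p; _) ++ _ = _
    simp only [dA]
    split_ifs <;> simp
lemma strip_toList (s : String) : (PySem.Str.strip s).toList = PySem.Chars.strip s.toList :=
  PySem.Str.toList_strip s

-- whitespace / paren facts
lemma not_isspace_lparen : PySem.Chars.isspace '(' = false := by decide

lemma takeWhile_append_all {p : Char → Bool} {a : List Char} (l : List Char)
    (h : ∀ x ∈ a, p x = true) : (a ++ l).takeWhile p = a ++ l.takeWhile p := by
  induction a with
  | nil => simp
  | cons x xs ih =>
    simp only [List.cons_append, List.takeWhile_cons, h x (by simp)]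
    simp [ih (fun y hy => h y (by simp [hy]))]

lemma dropWhile_append_cons {p : Char → Bool} (a : List Char) (c : Char) (b : List Char)
    (hc : p c = false) :
    (a ++ c :: b).dropWhile p = a.dropWhile p ++ c :: b := by
  induction a with
  | nil => simp [hc]
  | cons x xs ih =>
    by_cases hx : p x = true
    · simp [hx, ih]
    · have hx' : p x = false := Bool.eq_false_iff.mpr hx
      simp [hx']

lemma rstrip_append_cons (u : List Char) (c : Char) (b : List Char)
    (hc : PySem.Chars.isspace c = false) :
    PySem.Chars.rstrip (u ++ c :: b) = u ++ c :: PySem.Chars.rstrip b := by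
  unfold PySem.Chars.rstrip
  rw [show (u ++ c :: b).reverse = b.reverse ++ c :: u.reverse by simp]
  rw [dropWhile_append_cons _ _ _ hc]
  simp

lemma lstrip_idem (l : List Char) : PySem.Chars.lstrip (PySem.Chars.lstrip l) = PySem.Chars.lstrip l := by
  unfold PySem.Chars.lstrip
  induction l with
  | nil => simp
  | cons c rest ih =>
    by_cases hc : PySem.Chars.isspace c = true
    · simp [hc, ih]
    · have hc' : PySem.Chars.isspace c = false := Bool.eq_false_iff.mpr hc
      simp [hc']

lemma lstrip_sublist (l : List Char) : (PySem.Chars.lstrip l).Sublist l :=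
  List.dropWhile_sublist _

lemma rstrip_sublist (l : List Char) : (PySem.Chars.rstrip l).Sublist l := by
  unfold PySem.Chars.rstrip
  have h : (l.reverse.dropWhile PySem.Chars.isspace).Sublist l.reverse :=
    List.dropWhile_sublist _
  have := h.reverse
  simpa using this

lemma strip_sublist (l : List Char) : (PySem.Chars.strip l).Sublist l := by
  unfold PySem.Chars.strip
  exact (rstrip_sublist _).trans (lstrip_sublist _)

-- decomposition of a list at its first '('
lemma first_lparen_decomp {l : List Char} (h : '(' ∈ l) :
    ∃ a b, l = a ++ '(' :: b ∧ a = l.takeWhile (fun c => c != '(') ∧ '(' ∉ a := by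
  induction l with
  | nil => simp at h
  | cons c rest ih =>
    by_cases hc : c = '('
    · subst hc
      exact ⟨[], rest, by simp [List.takeWhile]⟩
    · have hmem : '(' ∈ rest := by
        rcases List.mem_cons.mp h with h1 | h1
        · exact absurd h1.symm hc
        · exact h1
      obtain ⟨a, b, hab, hatw, hna⟩ := ih hmem
      refine ⟨c :: a, b, by simp [hab], ?_, ?_⟩
      · have hbc : (c != '(') = true := by simp [Ne.symm, hc]
        simp [List.takeWhile, hbc, hatw]
      · simp [hna]
        exact fun hh => hc hh.symm

lemma infix_singleton_iff (c : Char) (l : List Char) : [c] <:+: l ↔ c ∈ l := by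
  constructor
  · intro h; exact h.subset (by simp)
  · intro h
    obtain ⟨s, t, rfl⟩ := List.append_of_mem h
    exact ⟨s, t, by simp⟩

lemma isIn_lparen_true {l : List Char} (h : '(' ∈ l) : PySem.Chars.isIn ['('] l = true :=
  (PySem.Chars.isIn_iff_infix _ _).mpr ((infix_singleton_iff _ _).mpr h)

lemma isIn_lparen_false {l : List Char} (h : '(' ∉ l) : PySem.Chars.isIn ['('] l = false := by
  cases hb : PySem.Chars.isIn ['('] l with
  | false => rfl
  | true =>
    exact absurd ((infix_singleton_iff _ _).mp ((PySem.Chars.isIn_iff_infix _ _).mp hb)) h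

lemma toList_eq_nil (s : String) : s.toList = [] ↔ s = "" := by
  constructor
  · intro h
    calc s = String.ofList s.toList := String.ofList_toList.symm
      _ = "" := by rw [h]
  · intro h; subst h; rfl

lemma strip_decomp (a b : List Char) :
    PySem.Chars.strip (a ++ '(' :: b)
      = PySem.Chars.lstrip a ++ '(' :: PySem.Chars.rstrip b := by
  unfold PySem.Chars.strip
  rw [show PySem.Chars.lstrip (a ++ '(' :: b) = PySem.Chars.lstrip a ++ '(' :: b from by
    unfold PySem.Chars.lstrip; exact dropWhile_append_cons _ _ _ not_isspace_lparen]
  exact rstrip_append_cons _ _ _ not_isspace_lparen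

lemma strip_lstrip (a : List Char) : PySem.Chars.strip (PySem.Chars.lstrip a) = PySem.Chars.strip a := by
  unfold PySem.Chars.strip
  rw [lstrip_idem]

-- the central per-chunk equality: A's per-part work equals delta on the chunk
lemma dA_eq_delta (p : String) : dA p = delta p.toList := by
  by_cases hlp : '(' ∈ p.toList
  · obtain ⟨a, b, hdec, hatw, hna⟩ := first_lparen_decomp hlp
    have hstrip : (PySem.Str.strip p).toList
        = PySem.Chars.lstrip a ++ '(' :: PySem.Chars.rstrip b := by
      rw [strip_toList, hdec, strip_decomp]
    have hne : PySem.Str.strip p ≠ "" := by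
      intro h
      rw [← toList_eq_nil] at h
      simp [hstrip] at h
    have hmem : '(' ∈ (PySem.Str.strip p).toList := by simp [hstrip]
    have hii : PySem.Str.isIn "(" (PySem.Str.strip p) = true := isIn_lparen_true hmem
    -- the head of strip(p).split('(')
    have hlana : '(' ∉ PySem.Chars.lstrip a := fun h => hna ((lstrip_sublist a).subset h)
    have htw : ((PySem.Str.strip p).toList).takeWhile (fun c => c != '(')
        = PySem.Chars.lstrip a := by
      rw [hstrip, takeWhile_append_all _ (fun x hx => by
        simp; exact fun hh => hlana (hh ▸ hx))]
      simp [List.takeWhile]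
    obtain ⟨t, hsh⟩ := chunksC_shape '(' (PySem.Str.strip p).toList
    have hsplit := PySem.Str.split?_map (PySem.Str.strip p) "("
    rw [show ("(" : String).toList = ['('] from rfl] at hsplit
    rw [show PySem.Chars.split? (PySem.Str.strip p).toList ['(']
        = some (chunksC '(' (PySem.Str.strip p).toList) from by
      simp [PySem.Chars.split?, splitOn_eq_chunksC]] at hsplit
    cases ho : PySem.Str.split? (PySem.Str.strip p) "(" with
    | none => rw [ho] at hsplit; simp at hsplit
    | some L =>
      rw [ho] at hsplit
      simp only [Option.map_some, Option.some.injEq] at hsplit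
      cases L with
      | nil => rw [hsh] at hsplit; simp at hsplit
      | cons x L' =>
        have hx : x.toList = PySem.Chars.lstrip a := by
          rw [hsh] at hsplit
          simp only [List.map_cons, List.cons.injEq] at hsplit
          rw [hsplit.1, htw]
        -- both names have the same character list
        have hcn : (PySem.Str.strip (PySem.Str.stripChars (PySem.Str.strip
            (((PySem.Str.split? (PySem.Str.strip p) "(").getD []).headD "")) ",")).toList
            = PySem.Chars.strip (PySem.Chars.stripChars (PySem.Chars.strip a) [',']) := by
          rw [ho]
          show (PySem.Str.strip (PySem.Str.stripChars (PySem.Str.strip x) ",")).toList = _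
          rw [strip_toList, PySem.Str.toList_stripChars, strip_toList, hx]
          rw [show (PySem.Chars.strip (PySem.Chars.lstrip a)) = PySem.Chars.strip a from strip_lstrip a]
          rfl
        have hofl : PySem.Str.strip (PySem.Str.stripChars (PySem.Str.strip
            (((PySem.Str.split? (PySem.Str.strip p) "(").getD []).headD "")) ",")
            = String.ofList (PySem.Chars.strip (PySem.Chars.stripChars (PySem.Chars.strip a) [','])) := by
          rw [← hcn, String.ofList_toList]
        simp only [dA, delta, if_pos hlp, if_neg hne, hii, hofl, ← hatw, emitName]
        by_cases hz : PySem.Chars.strip (PySem.Chars.stripChars (PySem.Chars.strip a) [',']) = []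
        · simp [hz]
        · simp [hz]
  · have h1 : '(' ∉ (PySem.Str.strip p).toList := by
      rw [strip_toList]
      exact fun h => hlp ((strip_sublist _).subset h)
    simp only [dA, delta, if_neg hlp]
    by_cases hpe : PySem.Str.strip p = ""
    · simp [hpe]
    · have hii : PySem.Str.isIn "(" (PySem.Str.strip p) = false := isIn_lparen_false h1
      have h1' : '(' ∉ PySem.Chars.strip p.toList := by rw [← strip_toList]; exact h1
      have hii' : PySem.Chars.isIn ['('] (PySem.Chars.strip p.toList) = false :=
        isIn_lparen_false h1'
      simp [hpe, hii']

-- ---- B-side scan characterisation ----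
lemma altStep_rparen (n : List String) (b : List Char) (s : Bool) :
    altStep (n, b, s) ')' = (n, [], false) := by simp [altStep]

lemma altStep_lparen_false (n : List String) (b : List Char) :
    altStep (n, b, false) '(' = (n ++ emitName b, b, true) := by
  have hname : PySem.Str.strip (PySem.Str.stripChars (PySem.Str.strip (String.ofList b)) ",")
      = String.ofList (PySem.Chars.strip (PySem.Chars.stripChars (PySem.Chars.strip b) [','])) := by
    have h1 : (PySem.Str.strip (PySem.Str.stripChars (PySem.Str.strip (String.ofList b)) ",")).toList
        = PySem.Chars.strip (PySem.Chars.stripChars (PySem.Chars.strip b) [',']) := by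
      rw [strip_toList, PySem.Str.toList_stripChars, strip_toList, String.toList_ofList]
      rfl
    calc PySem.Str.strip (PySem.Str.stripChars (PySem.Str.strip (String.ofList b)) ",")
        = String.ofList (PySem.Str.strip (PySem.Str.stripChars (PySem.Str.strip (String.ofList b)) ",")).toList := String.ofList_toList.symm
      _ = _ := by rw [h1]
  simp only [altStep, hname]
  by_cases hn : PySem.Chars.strip (PySem.Chars.stripChars (PySem.Chars.strip b) [',']) = []
  · simp [emitName, hn]
  · simp [emitName, hn]

lemma altStep_lparen_true (n : List String) (b : List Char) :
    altStep (n, b, true) '(' = (n, b, true) := by simp [altStep]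

lemma altStep_other (n : List String) (b : List Char) (s : Bool) (c : Char)
    (h1 : c ≠ ')') (h2 : c ≠ '(') :
    altStep (n, b, s) c = (n, if s then b else b ++ [c], s) := by
  cases s <;> simp [altStep, h1, h2]

lemma scan_both (cs : List Char) :
    (∀ (names : List String) (buf : List Char), '(' ∉ buf →
      (cs.foldl altStep (names, buf, false)).1
        = names ++ delta (buf ++ (chunksC ')' cs).headD [])
            ++ ((chunksC ')' cs).tail).flatMap delta)
    ∧ (∀ (names : List String) (buf : List Char),
      (cs.foldl altStep (names, buf, true)).1
        = names ++ ((chunksC ')' cs).tail).flatMap delta) := by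
  induction cs with
  | nil =>
    constructor
    · intro names buf hbuf
      simp [chunksC, delta, hbuf]
    · intro names buf
      simp [chunksC]
  | cons c cs ih =>
    obtain ⟨S, T⟩ := ih
    obtain ⟨t, ht⟩ := chunksC_shape ')' cs
    constructor
    · intro names buf hbuf
      by_cases hc : c = ')'
      · subst hc
        rw [List.foldl_cons, altStep_rparen, S names [] (by simp)]
        have hd : delta buf = [] := by simp [delta, hbuf]
        simp [chunksC, ht, hd, List.flatMap_cons, List.append_assoc]
      · by_cases hp : c = '('
        · subst hp
          rw [List.foldl_cons, altStep_lparen_false, T]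
          have hmem : '(' ∈ buf ++ '(' :: (List.takeWhile (fun c => c != ')') cs) := by simp
          have htw : (buf ++ '(' :: (List.takeWhile (fun c => c != ')') cs)).takeWhile
              (fun c => c != '(') = buf := by
            rw [takeWhile_append_all _ (fun x hx => by
              simp; exact fun hh => hbuf (hh ▸ hx))]
            simp [List.takeWhile]
          have hd : delta (buf ++ '(' :: (List.takeWhile (fun c => c != ')') cs))
              = emitName buf := by
            simp [delta, hmem, htw]
          simp [chunksC, ht, mapHead, hd, List.append_assoc]
        · rw [List.foldl_cons, altStep_other _ _ _ _ hc hp]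
          have hnb : '(' ∉ buf ++ [c] := by
            simp [hbuf]; exact fun hh => hp hh.symm
          rw [show (if false = true then buf else buf ++ [c]) = buf ++ [c] by simp]
          rw [S names (buf ++ [c]) hnb]
          simp [chunksC, hc, ht, mapHead, List.append_assoc]
    · intro names buf
      by_cases hc : c = ')'
      · subst hc
        rw [List.foldl_cons, altStep_rparen, S names [] (by simp)]
        simp [chunksC, ht, List.flatMap_cons, delta]
      · by_cases hp : c = '('
        · subst hp
          rw [List.foldl_cons, altStep_lparen_true, T]
          simp [chunksC, ht, mapHead]
        · rw [List.foldl_cons, altStep_other _ _ _ _ hc hp]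
          rw [show (if true = true then buf else buf ++ [c]) = buf by simp]
          rw [T names buf]
          simp [chunksC, hc, ht, mapHead]

-- ---- main proof ----
lemma flatMap_dA (L : List String) :
    L.flatMap dA = (L.map String.toList).flatMap delta := by
  induction L with
  | nil => simp
  | cons x L ih => simp [dA_eq_delta, ih]

-- ===== VERDICT (by name: the statement is the Claim_ definition above) =====
theorem extract_ai_names_spec : Claim_equal_extract_ai_names := by
  intro value _
  show extract_ai_names value = extract_ai_names_alt value
  by_cases hg : value = "" ∨ PySem.Str.strip value = ""
  · simp [extract_ai_names, extract_ai_names_alt, hg]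
  · have hsplit := PySem.Str.split?_map value ")"
    rw [show (")" : String).toList = [')'] from rfl] at hsplit
    rw [show PySem.Chars.split? value.toList [')'] = some (chunksC ')' value.toList) from by
      simp [PySem.Chars.split?, splitOn_eq_chunksC]] at hsplit
    cases ho : PySem.Str.split? value ")" with
    | none => rw [ho] at hsplit; simp at hsplit
    | some L =>
      rw [ho] at hsplit
      simp only [Option.map_some, Option.some.injEq] at hsplit
      have hA : L.foldl (fun names part0 =>
          let part := PySem.Str.strip part0
          if part = "" then names
          else if PySem.Str.isIn "(" part then
            let name := PySem.Str.strip (((PySem.Str.split? part "(").getD []).headD "")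
            let name := PySem.Str.strip (PySem.Str.stripChars name ",")
            if name = "" then names else names ++ [name]
          else names) ([] : List String)
          = (chunksC ')' value.toList).flatMap delta := by
        rw [foldl_dA, flatMap_dA, hsplit]
        simp
      have hB : (value.toList.foldl altStep ([], [], false)).1
          = (chunksC ')' value.toList).flatMap delta := by
        obtain ⟨t, hsh⟩ := chunksC_shape ')' value.toList
        rw [(scan_both value.toList).1 [] [] (by simp)]
        simp [hsh, List.flatMap_cons]
      simp only [extract_ai_names, extract_ai_names_alt, if_neg hg, ho, Option.getD_some]
      rw [hA, hB]
      split_ifs with h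
      · simp [split_tags, hg]
      · rfl
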